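-- pv_equiv track=rewrite | github.com/netra-systems/zen | netra_backend/tests/test_iteration3_clickhouse_control_character_failures.py | _sanitize_clickhouse_url
-- ===== SOURCE A (Python) =====
-- def _sanitize_clickhouse_url(url: str) -> str:
--     """
--     URL sanitization that SHOULD exist but currently doesn't work properly
--     This method represents what the system SHOULD do for sanitization
--     """
--     # This should remove ALL control characters, but currently doesn't
--     control_chars = [chr(i) for i in range(32)] + [chr(127)]
--
--     sanitized = url
--     for char in control_chars:
--         if char in sanitized:
--             # This should remove the character but currently doesn't
--             # Simulate the CURRENT broken behavior
--             if char != '\n':  # Simulate that only some chars are removed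
--                 sanitized = sanitized.replace(char, '')
--
--     # If newline is still present, this should fail
--     if '\n' in sanitized:
--         raise ValueError(f"Sanitization failed to remove newlines: {repr(sanitized)}")
--
--     return sanitized
-- ===== SOURCE B (Python) =====
-- def _sanitize_clickhouse_url(url: str) -> str:
--     # Single pass: keep a char iff it is '\n' or not a control char (ord 0-31 or 127).
--     sanitized = ''.join(c for c in url if c == '\n' or not (ord(c) < 32 or ord(c) == 127))
--     if '\n' in sanitized:
--         raise ValueError(f"Sanitization failed to remove newlines: {repr(sanitized)}")
--     return sanitized
-- ===== Notes on version B (the rewrite author's own statement) =====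
-- stated objective: idiomatic
-- what changed: Instead of looping over the 33 control characters and calling str.replace once per character (33 scans of the string), B makes a single pass over the URL's characters, keeping each one iff it is '\n' or not a control character by ordinal, and joins the survivors; both then raise ValueError if '\n' survives (i.e. was in the url).
import Mathlib
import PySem

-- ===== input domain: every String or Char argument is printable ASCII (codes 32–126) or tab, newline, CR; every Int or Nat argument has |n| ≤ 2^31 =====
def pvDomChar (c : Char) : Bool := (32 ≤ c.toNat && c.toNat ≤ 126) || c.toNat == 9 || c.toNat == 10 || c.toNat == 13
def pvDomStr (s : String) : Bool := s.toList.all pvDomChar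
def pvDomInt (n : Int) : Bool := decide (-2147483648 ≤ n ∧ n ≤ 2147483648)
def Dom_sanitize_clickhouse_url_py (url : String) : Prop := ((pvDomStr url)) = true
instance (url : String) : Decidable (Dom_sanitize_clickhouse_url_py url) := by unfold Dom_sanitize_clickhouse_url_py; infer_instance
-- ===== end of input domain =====

-- B replaces A's loop over the 33 control characters (one str.replace scan each) by one
-- single pass over the URL's characters, classifying each by its ordinal (idiomatic/one-pass).

-- ===== PORT A =====
-- control_chars = [chr(i) for i in range(32)] + [chr(127)]
def pvCtrlChars : List Char :=
  ((List.range 32).map (fun i => Char.ofNat i)) ++ [Char.ofNat 127]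

-- the for-loop over control_chars; the final "'\n' in sanitized" check raises exactly when
-- '\n' is in the url (removals never touch '\n'), which Pre_ excludes, so the
-- port returns the accumulated string.
def sanitize_clickhouse_url_py (url : String) : String :=
  pvCtrlChars.foldl (fun sanitized char =>
    if PySem.Str.isIn (String.ofList [char]) sanitized then
      (if char ≠ '\n' then PySem.Str.replace sanitized (String.ofList [char]) "" else sanitized)
    else sanitized) url

-- ===== PORT B =====
-- ''.join(c for c in url if c == '\n' or not (ord(c) < 32 or ord(c) == 127))
def sanitize_clickhouse_url_py_alt (url : String) : String :=
  String.ofList (url.toList.filter (fun c => c == '\n' || !(decide (c.toNat < 32) || c.toNat == 127)))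

-- ===== PRECONDITION & SPEC =====
-- Pre_ excludes urls containing '\n': there A raises ValueError (and B raises the same).
def Pre_sanitize_clickhouse_url_py (url : String) : Prop :=
  PySem.Str.isIn "\n" url = false
instance (url : String) : Decidable (Pre_sanitize_clickhouse_url_py url) := by
  unfold Pre_sanitize_clickhouse_url_py; infer_instance
def pvWitness_sanitize_clickhouse_url_py : String := "http://h\t "

def Spec_sanitize_clickhouse_url_py (url : String) (out : String) : Prop := out = sanitize_clickhouse_url_py_alt url
instance (url : String) (out : String) : Decidable (Spec_sanitize_clickhouse_url_py url out) := by unfold Spec_sanitize_clickhouse_url_py; infer_instance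

-- ===== CLAIM (what is proved, stated in full; the proofs are below) =====
def Claim_equal_sanitize_clickhouse_url_py : Prop := ∀ (url : String), Dom_sanitize_clickhouse_url_py url → Pre_sanitize_clickhouse_url_py url → Spec_sanitize_clickhouse_url_py url (sanitize_clickhouse_url_py url)

-- ===== LEMMAS AND PROOFS =====

-- replace.go for a single-char pattern and empty replacement is filter
theorem pv_replace_go_filter (c : Char) (l acc : List Char) (fuel : Nat)
    (h : l.length ≤ fuel) :
    PySem.Chars.replace.go [c] [] fuel l acc
      = acc.reverse ++ l.filter (fun x => !(x == c)) := by
  induction l generalizing fuel acc with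
  | nil => cases fuel <;> simp [PySem.Chars.replace.go]
  | cons a t ih =>
    cases fuel with
    | zero => simp at h
    | succ fuel =>
      have ht : t.length ≤ fuel := by simpa using h
      by_cases hac : c = a
      · subst hac
        simp only [PySem.Chars.replace.go, List.isPrefixOf, beq_self_eq_true, Bool.true_and,
          if_true, List.length_cons, List.length_nil, List.drop_succ_cons,
          List.drop_zero, List.reverse_nil, List.nil_append]
        rw [ih acc fuel ht, List.filter_cons]
        simp
      · have hb : (c == a) = false := by simp [hac]
        have hba : (a == c) = false := by simp [Ne.symm hac]
        simp only [PySem.Chars.replace.go, List.isPrefixOf, hb, Bool.false_and,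
          Bool.false_eq_true, if_false]
        rw [ih (a :: acc) fuel ht, List.filter_cons]
        simp [hba]

theorem pv_replace_filter (s : List Char) (c : Char) :
    PySem.Chars.replace s [c] [] = s.filter (fun x => !(x == c)) := by
  rw [PySem.Chars.replace]
  simp only [List.isEmpty_cons, Bool.false_eq_true, if_false]
  exact pv_replace_go_filter c s [] s.length le_rfl

-- one step of A's loop, after .toList, with the `char in sanitized` guard resolved
theorem pv_body_toList (s : String) (c : Char) :
    (if PySem.Str.isIn (String.ofList [c]) s then
      (if c ≠ '\n' then PySem.Str.replace s (String.ofList [c]) "" else s)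
    else s).toList
      = if c ≠ '\n' then s.toList.filter (fun x => !(x == c)) else s.toList := by
  by_cases hin : PySem.Str.isIn (String.ofList [c]) s = true
  · simp only [hin, if_true]
    by_cases hc : c = '\n'
    · simp [hc]
    · simp only [hc, ne_eq, not_false_iff, if_true]
      rw [PySem.Str.toList_replace]
      simp only [String.toList_ofList, String.toList_empty]
      exact pv_replace_filter s.toList c
  · simp only [Bool.not_eq_true] at hin
    simp only [hin, Bool.false_eq_true, if_false]
    by_cases hc : c = '\n'
    · simp [hc]
    · have hnf : ¬ ([c] <:+: s.toList) := by
        rw [← PySem.Chars.isIn_iff_infix]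
        simpa [PySem.Str.isIn_eq] using hin
      have hnm : c ∉ s.toList := by
        intro hm
        obtain ⟨l1, l2, he⟩ := List.append_of_mem hm
        exact hnf ⟨l1, l2, by rw [he]; simp⟩
      simp only [hc, ne_eq, not_false_iff, if_true]
      rw [List.filter_eq_self.mpr]
      intro x hx
      simp only [Bool.not_eq_eq_eq_not, Bool.not_true, beq_eq_false_iff_ne, ne_eq]
      intro he; exact hnm (he ▸ hx)

-- the whole loop is one filter by (x = '\n' ∨ x ∉ L)
theorem pv_fold_filter (L : List Char) (s : String) :
    (L.foldl (fun sanitized char =>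
      if PySem.Str.isIn (String.ofList [char]) sanitized then
        (if char ≠ '\n' then PySem.Str.replace sanitized (String.ofList [char]) "" else sanitized)
      else sanitized) s).toList
      = s.toList.filter (fun x => x == '\n' || !(L.contains x)) := by
  induction L generalizing s with
  | nil => simp
  | cons c T ih =>
    rw [List.foldl_cons, ih, pv_body_toList]
    by_cases hc : c = '\n'
    · subst hc
      rw [if_neg (by simp)]
      apply List.filter_congr
      intro x _
      by_cases hx : x = '\n' <;> simp [hx]
    · rw [if_pos hc, List.filter_filter]
      apply List.filter_congr
      intro x _
      by_cases hx : x = c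
      · subst hx; simp [hc]
      · simp [hx]

theorem pv_toNat_ofNat (i : Nat) (h : i < 128) : (Char.ofNat i).toNat = i := by
  unfold Char.ofNat
  split
  · rfl
  · next hn => exact absurd (Or.inl (by omega)) hn

-- membership in the control-character list, by ordinal
theorem pv_mem_ctrl (x : Char) :
    pvCtrlChars.contains x = (decide (x.toNat < 32) || x.toNat == 127) := by
  unfold pvCtrlChars
  by_cases h1 : x.toNat < 32
  · have hm : x ∈ (List.range 32).map (fun i => Char.ofNat i) := by
      simp only [List.mem_map, List.mem_range]
      exact ⟨x.toNat, h1, Char.ofNat_toNat x⟩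
    simp [List.contains_eq_mem, hm, h1]
  · by_cases h2 : x.toNat = 127
    · have hx : x = Char.ofNat 127 := by
        rw [← h2]; exact (Char.ofNat_toNat x).symm
      simp [List.contains_eq_mem, hx]
    · have hm : x ∉ (List.range 32).map (fun i => Char.ofNat i) := by
        simp only [List.mem_map, List.mem_range]
        rintro ⟨i, hi, rfl⟩
        rw [pv_toNat_ofNat i (by omega)] at h1 h2
        omega
      have hm2 : x ≠ Char.ofNat 127 := by
        intro he
        rw [he, pv_toNat_ofNat 127 (by omega)] at h2
        exact h2 rfl
      simp [List.contains_eq_mem, hm, hm2, h1, h2]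

-- ===== VERDICT (by name: the statement is the Claim_ definition above) =====
theorem sanitize_clickhouse_url_py_spec : Claim_equal_sanitize_clickhouse_url_py := by
  intro url _ _
  unfold Spec_sanitize_clickhouse_url_py sanitize_clickhouse_url_py sanitize_clickhouse_url_py_alt
  apply String.ext
  rw [pv_fold_filter]
  simp only [String.toList_ofList]
  apply List.filter_congr
  intro x _
  rw [pv_mem_ctrl]
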